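-- pv_equiv track=rewrite | github.com/Fatih0234/job-seeking-web-scrape | job_scrape/xing_detail.py | _apollo_work_model
-- ===== SOURCE A (Python) =====
-- from typing import Any, Optional
--
-- def _apollo_work_model(remote_options: Any) -> Optional[str]:
--     if not isinstance(remote_options, list):
--         return None
--     opts = [str(x).upper() for x in remote_options if x]
--     if any("HYBRID" in x for x in opts):
--         return "Hybrid"
--     if any("REMOTE" in x for x in opts) and not any("NON_REMOTE" in x for x in opts):
--         return "Remote"
--     if any("NON_REMOTE" in x for x in opts):
--         return "On-site"
--     return None
-- ===== SOURCE B (Python) =====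
-- from typing import Any, Optional
--
-- def _apollo_work_model(remote_options: Any) -> Optional[str]:
--     if not isinstance(remote_options, list):
--         return None
--     has_hybrid = has_remote = has_non_remote = False
--     for x in remote_options:
--         if x:
--             s = str(x).upper()
--             has_hybrid = has_hybrid or "HYBRID" in s
--             has_remote = has_remote or "REMOTE" in s
--             has_non_remote = has_non_remote or "NON_REMOTE" in s
--     if has_hybrid:
--         return "Hybrid"
--     if has_remote and not has_non_remote:
--         return "Remote"
--     if has_non_remote:
--         return "On-site"
--     return None
-- ===== Notes on version B (the rewrite author's own statement) =====
-- stated objective: simpler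
-- what changed: Replaces the intermediate uppercased list and three separate any(...) scans with a single pass over remote_options that accumulates three boolean flags, then applies the same cascade.
import Mathlib
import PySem

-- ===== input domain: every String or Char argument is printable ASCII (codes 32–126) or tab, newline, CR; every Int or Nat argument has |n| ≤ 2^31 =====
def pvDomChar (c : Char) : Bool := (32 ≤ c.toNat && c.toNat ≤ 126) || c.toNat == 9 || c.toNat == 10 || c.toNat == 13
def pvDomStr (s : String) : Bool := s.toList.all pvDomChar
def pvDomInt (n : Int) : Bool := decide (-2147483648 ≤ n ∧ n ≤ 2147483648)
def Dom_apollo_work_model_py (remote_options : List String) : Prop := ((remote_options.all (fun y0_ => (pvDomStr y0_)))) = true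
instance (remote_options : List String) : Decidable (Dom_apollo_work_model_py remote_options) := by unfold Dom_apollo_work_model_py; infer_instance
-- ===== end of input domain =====

-- B replaces A's intermediate uppercased list and three separate any-scans with one
-- single pass accumulating three boolean flags (simpler decomposition, same cascade).


-- ===== PORT A =====
-- opts = [str(x).upper() for x in remote_options if x]  (str truthiness = nonempty)
def apollo_work_model_py (remote_options : List String) : Option String :=
  let opts := (remote_options.filter (fun x => x ≠ "")).map PySem.Str.upper
  if opts.any (fun x => PySem.Str.isIn "HYBRID" x) then some "Hybrid"
  else if opts.any (fun x => PySem.Str.isIn "REMOTE" x)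
        && !(opts.any (fun x => PySem.Str.isIn "NON_REMOTE" x)) then some "Remote"
  else if opts.any (fun x => PySem.Str.isIn "NON_REMOTE" x) then some "On-site"
  else none

-- ===== PORT B =====
-- single pass: fold three flags (has_hybrid, has_remote, has_non_remote) over the list
def apollo_work_model_py_alt (remote_options : List String) : Option String :=
  let flags := remote_options.foldl
    (fun (acc : Bool × Bool × Bool) x =>
      if x ≠ "" then
        let s := PySem.Str.upper x
        (acc.1 || PySem.Str.isIn "HYBRID" s,
         acc.2.1 || PySem.Str.isIn "REMOTE" s,
         acc.2.2 || PySem.Str.isIn "NON_REMOTE" s)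
      else acc)
    (false, false, false)
  if flags.1 then some "Hybrid"
  else if flags.2.1 && !flags.2.2 then some "Remote"
  else if flags.2.2 then some "On-site"
  else none

-- ===== PRECONDITION & SPEC =====
def Spec_apollo_work_model_py (remote_options : List String) (out : Option String) : Prop := out = apollo_work_model_py_alt remote_options
instance (remote_options : List String) (out : Option String) : Decidable (Spec_apollo_work_model_py remote_options out) := by unfold Spec_apollo_work_model_py; infer_instance

-- ===== CLAIM (what is proved, stated in full; the proofs are below) =====
def Claim_equal_apollo_work_model_py : Prop := ∀ (remote_options : List String), Dom_apollo_work_model_py remote_options → Spec_apollo_work_model_py remote_options (apollo_work_model_py remote_options)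

-- ===== LEMMAS AND PROOFS =====

-- the fold computes the three any-scans (disjoined with the incoming accumulator)
theorem pv_fold_eq_any (ro : List String) (a b c : Bool) :
    ro.foldl
      (fun (acc : Bool × Bool × Bool) x =>
        if x ≠ "" then
          let s := PySem.Str.upper x
          (acc.1 || PySem.Str.isIn "HYBRID" s,
           acc.2.1 || PySem.Str.isIn "REMOTE" s,
           acc.2.2 || PySem.Str.isIn "NON_REMOTE" s)
        else acc)
      (a, b, c)
    = (a || ((ro.filter (fun x => x ≠ "")).map PySem.Str.upper).any (fun x => PySem.Str.isIn "HYBRID" x),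
       b || ((ro.filter (fun x => x ≠ "")).map PySem.Str.upper).any (fun x => PySem.Str.isIn "REMOTE" x),
       c || ((ro.filter (fun x => x ≠ "")).map PySem.Str.upper).any (fun x => PySem.Str.isIn "NON_REMOTE" x)) := by
  induction ro generalizing a b c with
  | nil => simp
  | cons h t ih =>
    simp only [List.foldl_cons]
    by_cases hx : h = ""
    · rw [if_neg (by simp [hx]), ih]; simp [hx]
    · rw [if_pos hx, ih]; simp [hx, Bool.or_assoc]

-- ===== VERDICT (by name: the statement is the Claim_ definition above) =====
theorem apollo_work_model_py_spec : Claim_equal_apollo_work_model_py := by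
  intro ro _
  show apollo_work_model_py ro = apollo_work_model_py_alt ro
  unfold apollo_work_model_py apollo_work_model_py_alt
  rw [pv_fold_eq_any]
  simp
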